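-- pv_equiv track=rewrite | github.com/asdf263/IGB-ai | backend/services/features/graph_features.py | _build_interaction_graph
-- ===== SOURCE A (Python) =====
-- from typing import List, Dict, Any
-- from collections import defaultdict
--
-- def _build_interaction_graph(messages: List[Dict[str, Any]]) -> Dict[str, Dict[str, int]]:
--     """Build directed weighted graph from message interactions."""
--     graph = defaultdict(lambda: defaultdict(int))
--
--     for i in range(1, len(messages)):
--         sender = messages[i].get('sender', 'unknown')
--         prev_sender = messages[i-1].get('sender', 'unknown')
--
--         if sender != prev_sender:
--             graph[prev_sender][sender] += 1
--
--     return dict(graph)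
-- ===== SOURCE B (Python) =====
-- from typing import List, Dict, Any
-- from collections import defaultdict, Counter
--
-- def _build_interaction_graph(messages: List[Dict[str, Any]]) -> Dict[str, Dict[str, int]]:
--     """Build directed weighted graph from message interactions.
--
--     Run-length pipeline: collapse the sender sequence into runs of equal
--     consecutive senders (so the inequality test disappears from counting --
--     every boundary between adjacent runs is exactly one interaction), group
--     the boundary targets by source sender, and count each group with Counter."""
--     runs = []
--     for m in messages:
--         s = m.get('sender', 'unknown')
--         if not runs or runs[-1] != s:
--             runs.append(s)
--     targets = {}
--     for p, c in zip(runs, runs[1:]):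
--         targets.setdefault(p, []).append(c)
--     return {p: defaultdict(int, Counter(cs)) for p, cs in targets.items()}
-- ===== Notes on version B (the rewrite author's own statement) =====
-- stated objective: alternative
-- what changed: B replaces A's guarded single pass (test sender != prev_sender, increment a nested defaultdict inline) by a run-length pipeline: collapse the sender sequence into runs of equal consecutive senders so the inequality test disappears (each boundary between adjacent runs is exactly one interaction), group the boundary targets by source sender, then count each group with Counter.
import Mathlib
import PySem

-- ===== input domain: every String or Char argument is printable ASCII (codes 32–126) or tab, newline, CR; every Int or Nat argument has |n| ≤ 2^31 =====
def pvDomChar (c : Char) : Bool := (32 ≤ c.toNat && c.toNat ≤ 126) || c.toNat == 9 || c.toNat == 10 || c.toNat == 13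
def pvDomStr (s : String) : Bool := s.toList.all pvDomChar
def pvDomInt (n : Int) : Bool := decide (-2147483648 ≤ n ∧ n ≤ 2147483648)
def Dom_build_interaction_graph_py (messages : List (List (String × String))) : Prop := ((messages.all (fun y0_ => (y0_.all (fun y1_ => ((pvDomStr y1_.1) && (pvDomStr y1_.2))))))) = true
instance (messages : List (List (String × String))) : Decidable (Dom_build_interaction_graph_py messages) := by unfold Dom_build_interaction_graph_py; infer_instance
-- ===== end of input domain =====

-- B replaces A's guarded single pass by a run-length pipeline: collapse senders into runs of equal
-- consecutive senders, group run boundaries by source, count each group (objective: alternative).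

-- ===== PORT A =====
-- inside the loop 1 ≤ i < len(messages), so messages[i] / messages[i-1] never raise: pyGetD with default [] is exact there
def build_interaction_graph_py (messages : List (List (String × String))) : List (String × List (String × Int)) :=
  let graph : PySem.Dict String (PySem.Dict String Int) :=
    (PySem.List.pyRange 1 (messages.length : Int) 1).foldl (fun graph i =>
      let sender := (PySem.Dict.mk (PySem.List.pyGetD messages i [])).getD "sender" "unknown"
      let prev_sender := (PySem.Dict.mk (PySem.List.pyGetD messages (i-1) [])).getD "sender" "unknown"
      if sender ≠ prev_sender then
        graph.modify prev_sender PySem.Dict.empty (fun inner => inner.modify sender 0 (· + 1))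
      else graph) PySem.Dict.empty
  graph.items.map (fun kv => (kv.1, kv.2.items))

-- ===== PORT B =====
def build_interaction_graph_py_alt (messages : List (List (String × String))) : List (String × List (String × Int)) :=
  let runs : List String := messages.foldl (fun runs m =>
    let s := (PySem.Dict.mk m).getD "sender" "unknown"
    if runs.getLast? == some s then runs else runs ++ [s]) []
  let targets : PySem.Dict String (List String) :=
    (runs.zip runs.tail).foldl (fun d pr => d.modify pr.1 [] (· ++ [pr.2])) PySem.Dict.empty
  targets.items.map (fun pc => (pc.1, (PySem.Dict.counter pc.2).items))

-- ===== PRECONDITION & SPEC =====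
def Spec_build_interaction_graph_py (messages : List (List (String × String))) (out : List (String × List (String × Int))) : Prop := out = build_interaction_graph_py_alt messages
instance (messages : List (List (String × String))) (out : List (String × List (String × Int))) : Decidable (Spec_build_interaction_graph_py messages out) := by unfold Spec_build_interaction_graph_py; infer_instance

-- ===== CLAIM (what is proved, stated in full; the proofs are below) =====
def Claim_equal_build_interaction_graph_py : Prop := ∀ (messages : List (List (String × String))), Dom_build_interaction_graph_py messages → Spec_build_interaction_graph_py messages (build_interaction_graph_py messages)

-- ===== LEMMAS AND PROOFS =====

-- proof-side abbreviations for the fold steps of the two programs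
def pvNstep (g : PySem.Dict String (PySem.Dict String Int)) (pc : String × String) :
    PySem.Dict String (PySem.Dict String Int) :=
  g.modify pc.1 PySem.Dict.empty (fun inner => inner.modify pc.2 0 (· + 1))

def pvDstep (runs : List String) (s : String) : List String :=
  if runs.getLast? == some s then runs else runs ++ [s]

def pvGstep (d : PySem.Dict String (List String)) (pr : String × String) :
    PySem.Dict String (List String) :=
  d.modify pr.1 [] (· ++ [pr.2])

-- boundaries (adjacent pairs) of a list
def pvBnd (l : List String) : List (String × String) := l.zip l.tail

theorem pv_bnd_append (l : List String) (x : String) (h : l ≠ []) :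
    pvBnd (l ++ [x]) = pvBnd l ++ [(l.getLast h, x)] := by
  induction l with
  | nil => exact absurd rfl h
  | cons y t ih =>
    cases t with
    | nil => rfl
    | cons z t' =>
      have := ih (by simp)
      simp only [pvBnd] at this ⊢
      simp only [List.cons_append, List.tail_cons, List.zip_cons_cons] at this ⊢
      rw [this]
      simp [List.getLast]

-- folding the dedup step from a nonempty accumulator with known last element
theorem pv_bnd_foldl (s : List String) : ∀ (acc : List String) (a : String) (h : acc ≠ []),
    acc.getLast h = a →
    pvBnd (s.foldl pvDstep acc)
      = pvBnd acc ++ ((a :: s).zip s).filter (fun pr => pr.1 != pr.2) := by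
  induction s with
  | nil => intro acc a h _; simp
  | cons x t ih =>
    intro acc a h ha
    rw [List.foldl_cons]
    by_cases hax : a = x
    · have hstep : pvDstep acc x = acc := by
        unfold pvDstep
        rw [List.getLast?_eq_some_getLast h, ha, hax]
        simp
      rw [hstep, ih acc a h ha]
      simp [hax]
    · have hstep : pvDstep acc x = acc ++ [x] := by
        unfold pvDstep
        rw [List.getLast?_eq_some_getLast h, ha]
        simp [hax]
      have hlast : (acc ++ [x]).getLast (by simp) = x := by simp
      rw [hstep, ih (acc ++ [x]) x (by simp) hlast, pv_bnd_append acc x h, ha]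
      simp [hax]

-- boundaries of the run-length collapse = the unequal adjacent pairs
theorem pv_bnd_dedup (s : List String) :
    pvBnd (s.foldl pvDstep []) = (s.zip s.tail).filter (fun pr => pr.1 != pr.2) := by
  cases s with
  | nil => rfl
  | cons x t =>
    have hstep : pvDstep [] x = [x] := rfl
    rw [List.foldl_cons, hstep, pv_bnd_foldl t [x] x (by simp) (by simp)]
    rfl

-- grouping targets by source then counting each group = A's nested accumulation, at the items level
theorem pv_group_counter (qs : List (String × String)) :
    (qs.foldl pvNstep PySem.Dict.empty).items
      = (qs.foldl pvGstep PySem.Dict.empty).items.map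
          (fun pc => (pc.1, PySem.Dict.counter pc.2)) := by
  induction qs using List.reverseRecOn with
  | nil => rfl
  | append_singleton t e ih =>
    rw [List.foldl_append, List.foldl_cons, List.foldl_nil,
        List.foldl_append, List.foldl_cons, List.foldl_nil]
    set D := t.foldl pvGstep PySem.Dict.empty with hD
    set N := t.foldl pvNstep PySem.Dict.empty with hN
    have hndD : D.keys.Nodup := by
      rw [hD]
      exact PySem.Dict.nodup_keys_foldl_modify_key t Prod.fst []
        (fun d pr cs => cs ++ [pr.2]) PySem.Dict.empty (by simp [PySem.Dict.keys_empty])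
    have hkeys : N.keys = D.keys := by
      simp only [PySem.Dict.keys, ih, List.map_map]
      rfl
    have hndN : N.keys.Nodup := hkeys ▸ hndD
    have hcon : N.contains e.1 = D.contains e.1 := by
      rw [PySem.Dict.contains_eq_decide_mem_keys, PySem.Dict.contains_eq_decide_mem_keys, hkeys]
    have hGmod : pvGstep D e = D.insert e.1 (D.getD e.1 [] ++ [e.2]) := rfl
    have hNmod : pvNstep N e
        = N.insert e.1 ((N.getD e.1 PySem.Dict.empty).modify e.2 0 (· + 1)) := rfl
    by_cases hc : D.contains e.1 = true
    · -- source already present: both sides replace its entry in place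
      have hcN : N.contains e.1 = true := hcon.trans hc
      have hmem : e.1 ∈ D.keys := (PySem.Dict.contains_iff_mem_keys D e.1).mp hc
      rcases List.mem_map.mp hmem with ⟨it, hit, hk⟩
      have hit' : (e.1, it.2) ∈ D.items := by rwa [← hk, Prod.mk.eta]
      have hDval : D.getD e.1 [] = it.2 :=
        PySem.Dict.getD_of_mem_items D hit' hndD []
      have hNval : N.getD e.1 PySem.Dict.empty = PySem.Dict.counter it.2 := by
        have hmemN : (e.1, PySem.Dict.counter it.2) ∈ N.items := by
          rw [ih]
          exact List.mem_map.mpr ⟨it, hit, by rw [hk]⟩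
        exact PySem.Dict.getD_of_mem_items N hmemN hndN PySem.Dict.empty
      rw [hGmod, hNmod, PySem.Dict.items_insert_of_contains _ _ hcN,
          PySem.Dict.items_insert_of_contains _ _ hc, ih, List.map_map, List.map_map]
      apply List.map_congr_left
      intro q _
      by_cases hq : (q.1 == e.1) = true
      · simp [Function.comp, hq, hNval, hDval, PySem.Dict.counter_append_singleton]
      · simp [Function.comp, hq]
    · -- fresh source: both sides append a fresh entry
      have hc' : D.contains e.1 = false := by simpa using hc
      have hcN : N.contains e.1 = false := hcon.trans hc'
      have hDval : D.getD e.1 [] = [] := PySem.Dict.getD_of_not_contains D [] hc'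
      have hNval : N.getD e.1 PySem.Dict.empty = PySem.Dict.empty :=
        PySem.Dict.getD_of_not_contains N PySem.Dict.empty hcN
      rw [hGmod, hNmod, PySem.Dict.items_insert_of_not_contains _ _ hcN,
          PySem.Dict.items_insert_of_not_contains _ _ hc', hDval, hNval, ih, List.map_append]
      rfl

-- index loop over adjacent positions 1..len-1 = fold over zipped consecutive pairs
theorem pv_foldl_range_adjacent {α β : Type} (xs : List α) (d : α) (f : β → α → α → β) (init : β) :
    (PySem.List.pyRange 1 (xs.length : Int) 1).foldl
      (fun b i => f b (PySem.List.pyGetD xs (i-1) d) (PySem.List.pyGetD xs i d)) init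
      = (xs.zip xs.tail).foldl (fun b pr => f b pr.1 pr.2) init := by
  have hz : xs.zip xs.tail = (List.range ((xs.length : Int) - 1).toNat).map
      (fun k : ℕ => (PySem.List.pyGetD xs (k : Int) d, PySem.List.pyGetD xs ((k : Int) + 1) d)) := by
    apply List.ext_getElem
    · simp [List.length_zip]
    · intro k h1 h2
      have hk : k + 1 < xs.length := by
        simp [List.length_zip] at h1
        omega
      simp only [List.getElem_zip, List.getElem_map, List.getElem_range]
      rw [PySem.List.pyGetD_eq_getElem xs d (by exact_mod_cast Nat.zero_le k)
            (by exact_mod_cast Nat.lt_of_succ_lt hk),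
          PySem.List.pyGetD_eq_getElem xs d (by positivity) (by exact_mod_cast hk)]
      rw [List.getElem_tail]
      congr 1
  rw [PySem.List.pyRange_one, List.foldl_map, hz, List.foldl_map]
  have harg : ∀ (k : ℕ), (1 + (k : Int) - 1) = (k : Int) := by intro k; ring
  have harg2 : ∀ (k : ℕ), (1 + (k : Int)) = ((k : Int) + 1) := by intro k; ring
  congr 1
  funext b k
  rw [harg, harg2]

-- ===== VERDICT (by name: the statement is the Claim_ definition above) =====
theorem build_interaction_graph_py_spec : Claim_equal_build_interaction_graph_py := by
  intro messages _
  unfold Spec_build_interaction_graph_py build_interaction_graph_py build_interaction_graph_py_alt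
  dsimp only
  -- name the sender sequence
  set f : List (String × String) → String :=
    fun m => (PySem.Dict.mk m).getD "sender" "unknown" with hf
  -- A's index loop = a pvNstep fold over the unequal adjacent sender pairs
  have hA1 := pv_foldl_range_adjacent messages ([] : List (String × String))
    (fun (g : PySem.Dict String (PySem.Dict String Int)) m1 m2 =>
      if f m2 ≠ f m1 then
        g.modify (f m1) PySem.Dict.empty (fun inner => inner.modify (f m2) 0 (· + 1))
      else g) PySem.Dict.empty
  have htail : (messages.map f).tail = messages.tail.map f := by
    cases messages <;> rfl
  have hA2 : (messages.zip messages.tail).foldl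
        (fun (b : PySem.Dict String (PySem.Dict String Int))
            (pr : List (String × String) × List (String × String)) =>
          if f pr.2 ≠ f pr.1 then
            b.modify (f pr.1) PySem.Dict.empty (fun inner => inner.modify (f pr.2) 0 (· + 1))
          else b) PySem.Dict.empty
      = ((messages.map f).zip (messages.map f).tail).foldl
        (fun graph pr =>
          if pr.2 ≠ pr.1 then
            graph.modify pr.1 PySem.Dict.empty (fun inner => inner.modify pr.2 0 (· + 1))
          else graph) PySem.Dict.empty := by
    rw [htail, List.zip_map, List.foldl_map]
    rfl
  have hsend : ∀ (sp : List (String × String)),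
      sp.foldl (fun graph pr =>
        if pr.2 ≠ pr.1 then
          graph.modify pr.1 PySem.Dict.empty (fun inner => inner.modify pr.2 0 (· + 1))
        else graph) PySem.Dict.empty
      = (sp.filter (fun pr => pr.1 != pr.2)).foldl pvNstep PySem.Dict.empty := by
    intro sp
    rw [List.foldl_filter]
    congr 1
    funext g pr
    by_cases h : pr.1 = pr.2
    · simp [h]
    · simp only [bne_iff_ne, ne_eq, h, not_false_eq_true, if_true, if_pos (Ne.symm h)]
      rfl
  -- B's run fold over messages = the pvDstep fold over senders
  have hruns : messages.foldl (fun runs m =>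
        if runs.getLast? == some (f m) then runs else runs ++ [f m]) []
      = (messages.map f).foldl pvDstep [] := by
    rw [List.foldl_map]
    rfl
  -- B's grouping fold = the pvGstep fold
  have hG : ∀ (qs : List (String × String)),
      qs.foldl (fun (d : PySem.Dict String (List String)) pr =>
        d.modify pr.1 [] (· ++ [pr.2])) PySem.Dict.empty
      = qs.foldl pvGstep PySem.Dict.empty := by intro qs; rfl
  set s := messages.map f with hs
  rw [hA1, hA2, hsend, hruns, hG, ← pv_bnd_dedup, pv_group_counter, List.map_map]
  rfl
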